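-- pv_equiv track=rewrite | github.com/andrew-g-gonzales/adventurers_guide_to_number_theory_python | adventures/ch2/guess_the_pattern.py | progressive_step_jump_twice_as_big
-- ===== SOURCE A (Python) =====
-- def progressive_step_jump_twice_as_big(limit):
--     start = 1
--     step = 1
--     for idx in range(start, limit):
--         stepped = list(range(start, ((start + step) ** 2), step)[:3])
--         start = stepped.pop()
--         step = step * 2
--         yield stepped
-- ===== SOURCE B (Python) =====
-- def progressive_step_jump_twice_as_big(limit):
--     # Closed form: at 0-based iteration i the original's state is
--     # start = 2**(i+1) - 1, step = 2**i, so it yields [2**(i+1)-1, 3*2**i-1].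
--     for i in range(limit - 1):
--         yield [2 ** (i + 1) - 1, 3 * 2 ** i - 1]
-- ===== Notes on version B (the rewrite author's own statement) =====
-- stated objective: simpler
-- what changed: Replaced the stateful range-build/slice/pop loop with a direct closed-form generator yielding [2**(i+1)-1, 3*2**i-1] for each i in range(limit-1).
import Mathlib
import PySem

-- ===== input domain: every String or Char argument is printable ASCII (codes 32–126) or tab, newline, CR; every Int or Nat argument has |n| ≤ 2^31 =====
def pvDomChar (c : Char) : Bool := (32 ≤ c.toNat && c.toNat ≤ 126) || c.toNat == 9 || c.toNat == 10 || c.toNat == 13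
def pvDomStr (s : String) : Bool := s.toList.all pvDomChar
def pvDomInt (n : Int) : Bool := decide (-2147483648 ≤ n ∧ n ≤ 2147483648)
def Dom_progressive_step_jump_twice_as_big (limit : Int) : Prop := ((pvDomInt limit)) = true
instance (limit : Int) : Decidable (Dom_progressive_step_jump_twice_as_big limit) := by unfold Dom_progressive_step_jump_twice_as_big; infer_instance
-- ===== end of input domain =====

-- B replaces A's range-build/slice/pop state machine with the closed form
-- [2^(i+1)-1, 3*2^i-1] per iteration (objective: simpler).
-- Both Pythons are generators; equivalence is about the list of yielded values.

-- ===== PORT A =====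
-- One loop body of A: stepped = list(range(start,(start+step)**2,step)[:3]);
-- start = stepped.pop(); step = step*2; yield stepped.
-- Python slices the range OBJECT arithmetically before materialising it:
-- range(a,b,s)[:3] = range(a, min(b, a+3*s), s) for s > 0, and step > 0 in every
-- reachable state of this loop (step starts at 1 and doubles) — exact there.
def pvStepA (st : Int × Int × List (List Int)) (_ : Int) : Int × Int × List (List Int) :=
  let stepped := PySem.List.pyRange st.1 (min ((st.1 + st.2.1) ^ 2) (st.1 + 3 * st.2.1)) st.2.1
  match PySem.List.pop? stepped with
  | some (last, rest) => (last, st.2.1 * 2, st.2.2 ++ [rest])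
  | none => st  -- unreachable: stepped always has three elements (pop never raises)

def progressive_step_jump_twice_as_big (limit : Int) : List (List Int) :=
  ((PySem.List.pyRange 1 limit 1).foldl pvStepA ((1 : Int), (1 : Int), ([] : List (List Int)))).2.2

-- ===== PORT B =====
-- exponents are Nat-valued (i ≥ 0 throughout the range), so .toNat is exact here
def progressive_step_jump_twice_as_big_alt (limit : Int) : List (List Int) :=
  (PySem.List.pyRange 0 (limit - 1) 1).map
    (fun i => [2 ^ (i + 1).toNat - 1, 3 * 2 ^ i.toNat - 1])

-- ===== PRECONDITION & SPEC =====
def Spec_progressive_step_jump_twice_as_big (limit : Int) (out : List (List Int)) : Prop := out = progressive_step_jump_twice_as_big_alt limit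
instance (limit : Int) (out : List (List Int)) : Decidable (Spec_progressive_step_jump_twice_as_big limit out) := by unfold Spec_progressive_step_jump_twice_as_big; infer_instance

-- ===== CLAIM (what is proved, stated in full; the proofs are below) =====
def Claim_equal_progressive_step_jump_twice_as_big : Prop := ∀ (limit : Int), Dom_progressive_step_jump_twice_as_big limit → Spec_progressive_step_jump_twice_as_big limit (progressive_step_jump_twice_as_big limit)

-- ===== LEMMAS AND PROOFS =====

-- One loop iteration of A, from the invariant state (start, step) = (2^(k+1)-1, 2^k).
theorem pvStepA_eq (k : Nat) (acc : List (List Int)) (x : Int) :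
    pvStepA ((2 : Int) ^ (k + 1) - 1, (2 : Int) ^ k, acc) x =
      ((2 : Int) ^ (k + 2) - 1, (2 : Int) ^ (k + 1),
        acc ++ [[(2 : Int) ^ (k + 1) - 1, 3 * 2 ^ k - 1]]) := by
  have hx : (1 : Int) ≤ 2 ^ k := one_le_pow₀ (by norm_num)
  have hs : (0 : Int) < 2 ^ k := by omega
  have hstep : PySem.List.pyRange ((2 : Int) ^ (k + 1) - 1)
      (min (((2 : Int) ^ (k + 1) - 1 + 2 ^ k) ^ 2) ((2 : Int) ^ (k + 1) - 1 + 3 * 2 ^ k)) (2 ^ k)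
      = [(2 : Int) ^ (k + 1) - 1, 3 * 2 ^ k - 1] ++ [(2 : Int) ^ (k + 2) - 1] := by
    have hmin : min (((2 : Int) ^ (k + 1) - 1 + 2 ^ k) ^ 2) ((2 : Int) ^ (k + 1) - 1 + 3 * 2 ^ k)
        = (2 : Int) ^ (k + 1) - 1 + 3 * 2 ^ k := by
      refine min_eq_right ?_
      have h2 : (2 : Int) ^ (k + 1) = 2 * 2 ^ k := by ring
      nlinarith [sq_nonneg ((2 : Int) ^ k - 1)]
    rw [hmin, PySem.List.pyRange_of_pos _ _ hs, if_pos (by omega)]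
    have hn : (((2 : Int) ^ (k + 1) - 1 + 3 * 2 ^ k - (2 ^ (k + 1) - 1) + 2 ^ k - 1) / 2 ^ k).toNat = 3 := by
      have he : (2 : Int) ^ (k + 1) - 1 + 3 * 2 ^ k - (2 ^ (k + 1) - 1) + 2 ^ k - 1
          = (2 ^ k - 1) + 3 * 2 ^ k := by ring
      rw [he, Int.add_mul_ediv_right _ _ (by omega : (2 : Int) ^ k ≠ 0),
        Int.ediv_eq_zero_of_lt (by omega) (by omega)]
      decide
    rw [hn]
    have hr3 : List.range 3 = [0, 1, 2] := by decide
    rw [hr3]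
    simp only [List.map_cons, List.map_nil]
    norm_num
    constructor
    · ring
    · ring
  simp only [pvStepA, hstep, PySem.List.pop?_last]
  rw [show (2 : Int) ^ k * 2 = 2 ^ (k + 1) from by ring]

-- The loop invariant: folding pvStepA over any n further elements from the state at
-- iteration k produces the closed-form blocks for iterations k, k+1, ..., k+n-1.
theorem pvLoop (l : List Int) : ∀ (k : Nat) (acc : List (List Int)),
    l.foldl pvStepA ((2 : Int) ^ (k + 1) - 1, (2 : Int) ^ k, acc) =
      ((2 : Int) ^ (k + l.length + 1) - 1, (2 : Int) ^ (k + l.length),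
        acc ++ (List.range l.length).map
          (fun j => [(2 : Int) ^ (k + j + 1) - 1, 3 * 2 ^ (k + j) - 1])) := by
  induction l with
  | nil => intro k acc; simp
  | cons x l ih =>
    intro k acc
    rw [List.foldl_cons, pvStepA_eq, ih (k + 1)]
    have h1 : k + 1 + l.length = k + (x :: l).length := by simp; omega
    rw [h1]
    congr 1
    congr 1
    rw [List.append_assoc]
    congr 1
    simp only [List.length_cons, List.range_succ_eq_map, List.map_cons, List.map_map,
      List.singleton_append]
    congr 1
    refine List.map_congr_left fun j _ => ?_
    simp only [Function.comp_apply, Nat.succ_eq_add_one]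
    rw [show k + 1 + j = k + (j + 1) from by omega]

-- ===== VERDICT (by name: the statement is the Claim_ definition above) =====
theorem progressive_step_jump_twice_as_big_spec : Claim_equal_progressive_step_jump_twice_as_big := by
  intro limit _
  show _ = _
  unfold progressive_step_jump_twice_as_big progressive_step_jump_twice_as_big_alt
  have h0 : ((1 : Int), (1 : Int), ([] : List (List Int))) =
      ((2 : Int) ^ (0 + 1) - 1, (2 : Int) ^ 0, ([] : List (List Int))) := by norm_num
  rw [h0, pvLoop]
  simp only [Nat.zero_add, List.nil_append]
  rw [PySem.List.pyRange_one 0 (limit - 1), List.map_map, PySem.List.length_pyRange_one,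
    sub_zero]
  refine List.map_congr_left ?_
  intro j _
  simp only [Function.comp_apply, zero_add]
  have e1 : ((j : Int) + 1).toNat = j + 1 := by omega
  have e2 : ((j : Int)).toNat = j := by omega
  rw [e1, e2]
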